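-- pv_equiv track=rewrite | github.com/serval-uni-lu/sherlock.replication | change-metrics/commit_changes/utils.py | update_diff
-- ===== SOURCE A (Python) =====
-- def update_diff(added, deleted, modifieds, based_on_ED = False, line_no_and_context = None):
-- 	"""
-- 	"""
-- 	if len(added) > 0 and len(deleted) > 0: # modified
-- 		#print ("Modification!")
-- 		if not based_on_ED:
-- 			if len(added) > len(deleted):
-- 				for i in range(len(deleted)):
-- 					new_lineno = added[i]
-- 					past_lineno = deleted[i]
-- 					modifieds['modified'].append([new_lineno, past_lineno])
--
-- 				for i in range(len(added) - len(deleted)):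
-- 					new_lineno = added[len(deleted) + i]
-- 					past_lineno = deleted[-1]
-- 					modifieds['modified'].append([new_lineno, past_lineno])
--
-- 			elif len(added) < len(deleted):
-- 				for i in range(len(added)):
-- 					new_lineno = added[i]
-- 					past_lineno = deleted[i]
-- 					modifieds['modified'].append([new_lineno, past_lineno])
--
-- 				for i in range(len(deleted) - len(added)):
-- 					new_lineno = added[-1]
-- 					past_lineno = deleted[len(added) + i]
-- 					modifieds['modified'].append([new_lineno, past_lineno])
--
-- 			else: # the same -> modification
-- 				for new_lineno, past_lineno in zip(added, deleted):
-- 					modifieds['modified'].append([new_lineno, past_lineno])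
-- 		else:
-- 			assert line_no_and_context is not None
-- 			"""
-- 			Use edit-distance to match deleted and added lines
-- 			"""
-- 			pass
--
-- 	elif len(added) == 0: # deleted
-- 		modifieds['deleted'].extend([(None, del_line) for del_line in deleted])
-- 	else: # added
-- 		modifieds['added'].extend([add_line, None] for add_line in added)
--
-- 	# reset as it has been updatec
-- 	added = []; deleted = []
-- 	return added, deleted, modifieds
-- ===== SOURCE B (Python) =====
-- def _pair(added, deleted):
--     # consume both lists head-by-head; when one side is down to its last
--     # element, broadcast it across the remainder of the other side
--     if len(added) == 1:
--         return [[added[0], d] for d in deleted]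
--     if len(deleted) == 1:
--         return [[a, deleted[0]] for a in added]
--     return [[added[0], deleted[0]]] + _pair(added[1:], deleted[1:])
--
-- def update_diff(added, deleted, modifieds, based_on_ED=False, line_no_and_context=None):
--     if added and deleted:  # modified
--         if not based_on_ED:
--             modifieds['modified'].extend(_pair(added, deleted))
--         else:
--             assert line_no_and_context is not None
--     elif not added:  # deleted
--         modifieds['deleted'].extend((None, d) for d in deleted)
--     else:  # added
--         modifieds['added'].extend([a, None] for a in added)
--     return [], [], modifieds
-- ===== Notes on version B (the rewrite author's own statement) =====
-- stated objective: alternative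
-- what changed: The three length-dispatched pairing loops of the modified branch are replaced by a recursive pairer that consumes both lists head-by-head and, once one side is reduced to its last element, broadcasts that element over the remainder of the other side.
import Mathlib
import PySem

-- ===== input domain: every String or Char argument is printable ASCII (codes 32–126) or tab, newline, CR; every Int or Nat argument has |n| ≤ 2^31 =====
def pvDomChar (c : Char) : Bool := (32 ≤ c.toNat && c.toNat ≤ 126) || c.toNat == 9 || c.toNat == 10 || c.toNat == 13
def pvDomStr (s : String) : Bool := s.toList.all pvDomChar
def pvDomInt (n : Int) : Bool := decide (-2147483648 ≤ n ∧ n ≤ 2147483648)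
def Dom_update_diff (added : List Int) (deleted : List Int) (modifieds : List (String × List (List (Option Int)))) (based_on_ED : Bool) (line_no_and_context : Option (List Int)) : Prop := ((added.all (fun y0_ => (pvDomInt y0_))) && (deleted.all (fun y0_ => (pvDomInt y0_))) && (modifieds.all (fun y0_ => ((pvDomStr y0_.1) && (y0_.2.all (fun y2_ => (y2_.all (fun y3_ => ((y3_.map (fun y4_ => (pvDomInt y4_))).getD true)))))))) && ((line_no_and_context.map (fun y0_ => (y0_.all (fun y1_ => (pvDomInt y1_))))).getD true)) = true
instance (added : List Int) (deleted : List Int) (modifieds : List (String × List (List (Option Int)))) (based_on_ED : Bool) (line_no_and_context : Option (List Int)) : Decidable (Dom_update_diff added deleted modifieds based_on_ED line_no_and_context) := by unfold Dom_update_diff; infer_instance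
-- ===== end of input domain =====

-- B replaces A's three length-dispatched pairing loops in the modified branch by a recursive
-- pairer that consumes both lists head-by-head and broadcasts the surviving last element
-- (objective: alternative).  Both Pythons mutate `modifieds` in place; the mutation performed
-- is the same and the claim here is about the returned value.

-- shared dict-mutation helper: modifieds[k].append/extend — update the first entry with key k
def dmod (m : List (String × List (List (Option Int)))) (k : String)
    (f : List (List (Option Int)) → List (List (Option Int))) : List (String × List (List (Option Int))) :=
  match m with
  | [] => []
  | (k', v) :: rest => if k' = k then (k', f v) :: rest else (k', v) :: dmod rest k f

-- ===== PORT A =====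
def update_diff (added : List Int) (deleted : List Int) (modifieds : List (String × List (List (Option Int)))) (based_on_ED : Bool) (line_no_and_context : Option (List Int)) : List Int × List Int × (List (String × List (List (Option Int)))) :=
  if added.length > 0 ∧ deleted.length > 0 then  -- modified
    if !based_on_ED then
      if added.length > deleted.length then
        let m1 := (List.range deleted.length).foldl (fun m i =>
          dmod m "modified" (fun v => v ++ [[some (added.getD i 0), some (deleted.getD i 0)]])) modifieds
        let m2 := (List.range (added.length - deleted.length)).foldl (fun m i =>
          dmod m "modified" (fun v => v ++ [[some (added.getD (deleted.length + i) 0), some ((deleted.getLast?).getD 0)]])) m1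
        ([], [], m2)
      else if added.length < deleted.length then
        let m1 := (List.range added.length).foldl (fun m i =>
          dmod m "modified" (fun v => v ++ [[some (added.getD i 0), some (deleted.getD i 0)]])) modifieds
        let m2 := (List.range (deleted.length - added.length)).foldl (fun m i =>
          dmod m "modified" (fun v => v ++ [[some ((added.getLast?).getD 0), some (deleted.getD (added.length + i) 0)]])) m1
        ([], [], m2)
      else
        ([], [], (added.zip deleted).foldl (fun m p =>
          dmod m "modified" (fun v => v ++ [[some p.1, some p.2]])) modifieds)
    else
      -- assert line_no_and_context is not None: Pre_ guarantees it; then `pass`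
      ([], [], modifieds)
  else if added.length = 0 then  -- deleted
    ([], [], dmod modifieds "deleted" (fun v => v ++ deleted.map (fun d => [none, some d])))
  else  -- added
    ([], [], dmod modifieds "added" (fun v => v ++ added.map (fun a => [some a, none])))

-- ===== PORT B =====
-- recursive pairer: consume both heads; a singleton side is broadcast over the other's rest
def pairRec : List Int → List Int → List (List (Option Int))
  | [a], d => d.map (fun x => ([some a, some x] : List (Option Int)))
  | a, [d] => a.map (fun x => ([some x, some d] : List (Option Int)))
  | a :: as, d :: ds => [some a, some d] :: pairRec as ds
  | _, _ => []

def update_diff_alt (added : List Int) (deleted : List Int) (modifieds : List (String × List (List (Option Int)))) (based_on_ED : Bool) (line_no_and_context : Option (List Int)) : List Int × List Int × (List (String × List (List (Option Int)))) :=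
  if added ≠ [] ∧ deleted ≠ [] then  -- modified
    if !based_on_ED then
      ([], [], dmod modifieds "modified" (fun v => v ++ pairRec added deleted))
    else
      ([], [], modifieds)
  else if added = [] then  -- deleted
    ([], [], dmod modifieds "deleted" (fun v => v ++ deleted.map (fun d => [none, some d])))
  else  -- added
    ([], [], dmod modifieds "added" (fun v => v ++ added.map (fun a => [some a, none])))

-- ===== PRECONDITION & SPEC =====
-- Pre_ excludes exactly the inputs where Python A raises: KeyError when the branch's key
-- ('modified'/'deleted'/'added') is absent from modifieds, and AssertionError when both
-- lists are nonempty, based_on_ED is true and line_no_and_context is None.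
def hasKey (m : List (String × List (List (Option Int)))) (k : String) : Bool :=
  m.any (fun p => p.1 = k)

def Pre_update_diff (added : List Int) (deleted : List Int) (modifieds : List (String × List (List (Option Int)))) (based_on_ED : Bool) (line_no_and_context : Option (List Int)) : Prop :=
  if added.length > 0 ∧ deleted.length > 0 then
    (if based_on_ED then line_no_and_context.isSome = true else hasKey modifieds "modified" = true)
  else if added.length = 0 then hasKey modifieds "deleted" = true
  else hasKey modifieds "added" = true
instance (added : List Int) (deleted : List Int) (modifieds : List (String × List (List (Option Int)))) (based_on_ED : Bool) (line_no_and_context : Option (List Int)) : Decidable (Pre_update_diff added deleted modifieds based_on_ED line_no_and_context) := by unfold Pre_update_diff; infer_instance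

def pvWitness_update_diff : List Int × List Int × (List (String × List (List (Option Int)))) × Bool × Option (List Int) :=
  ([1, 2], [3], [("modified", []), ("deleted", []), ("added", [])], false, none)

def Spec_update_diff (added : List Int) (deleted : List Int) (modifieds : List (String × List (List (Option Int)))) (based_on_ED : Bool) (line_no_and_context : Option (List Int)) (out : List Int × List Int × (List (String × List (List (Option Int))))) : Prop := out = update_diff_alt added deleted modifieds based_on_ED line_no_and_context
instance (added : List Int) (deleted : List Int) (modifieds : List (String × List (List (Option Int)))) (based_on_ED : Bool) (line_no_and_context : Option (List Int)) (out : List Int × List Int × (List (String × List (List (Option Int))))) : Decidable (Spec_update_diff added deleted modifieds based_on_ED line_no_and_context out) := by unfold Spec_update_diff; infer_instance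

-- ===== CLAIM (what is proved, stated in full; the proofs are below) =====
def Claim_equal_update_diff : Prop := ∀ (added : List Int) (deleted : List Int) (modifieds : List (String × List (List (Option Int)))) (based_on_ED : Bool) (line_no_and_context : Option (List Int)), Dom_update_diff added deleted modifieds based_on_ED line_no_and_context → Pre_update_diff added deleted modifieds based_on_ED line_no_and_context → Spec_update_diff added deleted modifieds based_on_ED line_no_and_context (update_diff added deleted modifieds based_on_ED line_no_and_context)

-- ===== LEMMAS AND PROOFS =====

-- proof-side intermediate: the clamped-index description of the paired records
def clampedPairs (a d : List Int) : List (List (Option Int)) :=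
  (List.range (max a.length d.length)).map (fun j =>
    [some (a.getD (min j (a.length - 1)) 0), some (d.getD (min j (d.length - 1)) 0)])

theorem dmod_id (m : List (String × List (List (Option Int)))) (k : String) :
    dmod m k (fun v => v) = m := by
  induction m with
  | nil => rfl
  | cons p rest ih =>
    obtain ⟨k', v⟩ := p
    by_cases h : k' = k <;> simp [dmod, h, ih]

theorem dmod_dmod (m : List (String × List (List (Option Int)))) (k : String) (f g : List (List (Option Int)) → List (List (Option Int))) :
    dmod (dmod m k f) k g = dmod m k (fun v => g (f v)) := by
  induction m with
  | nil => rfl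
  | cons p rest ih =>
    obtain ⟨k', v⟩ := p
    by_cases h : k' = k <;> simp [dmod, h, ih]

theorem foldl_dmod_append {α : Type} (xs : List α) (g : α → List (Option Int))
    (m : List (String × List (List (Option Int)))) (k : String) :
    xs.foldl (fun m x => dmod m k (fun v => v ++ [g x])) m
      = dmod m k (fun v => v ++ xs.map g) := by
  induction xs generalizing m with
  | nil => simp [dmod_id]
  | cons x xs ih =>
    simp only [List.foldl_cons, List.map_cons, ih, dmod_dmod]
    congr 1
    funext v
    simp

-- the three defining equations of pairRec, each definitional
theorem pairRec_one (x : Int) (d : List Int) :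
    pairRec [x] d = d.map (fun y => ([some x, some y] : List (Option Int))) := rfl

theorem pairRec_last (x x2 y : Int) (as' : List Int) :
    pairRec (x :: x2 :: as') [y]
      = (x :: x2 :: as').map (fun z => ([some z, some y] : List (Option Int))) := rfl

theorem pairRec_cons (x y : Int) (x2 y2 : Int) (as' ds' : List Int) :
    pairRec (x :: x2 :: as') (y :: y2 :: ds')
      = [some x, some y] :: pairRec (x2 :: as') (y2 :: ds') := rfl

theorem clamped_left (x : Int) (d : List Int) (hd : 0 < d.length) :
    clampedPairs [x] d = d.map (fun y => ([some x, some y] : List (Option Int))) := by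
  unfold clampedPairs
  apply List.ext_getElem
  · simp only [List.length_map, List.length_range, List.length_singleton]; omega
  · intro i h1 h2
    simp only [List.length_map, List.length_range] at h1
    have hi : i < d.length := by simp only [List.length_map] at h2; exact h2
    simp only [List.getElem_map, List.getElem_range, List.length_singleton]
    have e1 : min i (1 - 1) = 0 := by omega
    have e2 : min i (d.length - 1) = i := by omega
    rw [e1, e2, List.getD_eq_getElem _ _ (by simp : (0:Nat) < ([x] : List Int).length),
        List.getD_eq_getElem _ _ hi]
    simp

theorem clamped_right (y : Int) (a : List Int) (ha : 0 < a.length) :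
    clampedPairs a [y] = a.map (fun z => ([some z, some y] : List (Option Int))) := by
  unfold clampedPairs
  apply List.ext_getElem
  · simp only [List.length_map, List.length_range, List.length_singleton]; omega
  · intro i h1 h2
    simp only [List.length_map, List.length_range] at h1
    have hi : i < a.length := by simp only [List.length_map] at h2; exact h2
    simp only [List.getElem_map, List.getElem_range, List.length_singleton]
    have e1 : min i (1 - 1) = 0 := by omega
    have e2 : min i (a.length - 1) = i := by omega
    rw [e1, e2, List.getD_eq_getElem _ _ (by simp : (0:Nat) < ([y] : List Int).length),
        List.getD_eq_getElem _ _ hi]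
    simp

theorem clamped_cons (x y : Int) (as ds : List Int) (ha : 0 < as.length) (hd : 0 < ds.length) :
    clampedPairs (x :: as) (y :: ds) = [some x, some y] :: clampedPairs as ds := by
  unfold clampedPairs
  rw [show max (x :: as).length (y :: ds).length = max as.length ds.length + 1 by
        simp only [List.length_cons]; omega,
      List.range_succ_eq_map, List.map_cons, List.map_map]
  refine List.cons_eq_cons.mpr ⟨by simp, ?_⟩
  · apply List.map_congr_left
    intro j _
    have e1 : min (j + 1) ((x :: as).length - 1) = min j (as.length - 1) + 1 := by
      simp only [List.length_cons]; omega
    have e2 : min (j + 1) ((y :: ds).length - 1) = min j (ds.length - 1) + 1 := by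
      simp only [List.length_cons]; omega
    simp only [Function.comp_apply, e1, e2, List.getD_cons_succ]

theorem pairRec_eq_clamped (a d : List Int) (ha : a ≠ []) (hd : d ≠ []) :
    pairRec a d = clampedPairs a d := by
  induction a generalizing d with
  | nil => exact absurd rfl ha
  | cons x as ih =>
    cases as with
    | nil => rw [pairRec_one, clamped_left x d (List.length_pos_iff.mpr hd)]
    | cons x2 as' =>
      cases d with
      | nil => exact absurd rfl hd
      | cons y ds =>
        cases ds with
        | nil => rw [pairRec_last, clamped_right y _ (by simp)]
        | cons y2 ds' =>
          rw [pairRec_cons, ih (y2 :: ds') (by simp) (by simp),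
              clamped_cons x y _ _ (by simp) (by simp)]

theorem A_modified_eq (added deleted : List Int)
    (modifieds : List (String × List (List (Option Int))))
    (ha : 0 < added.length) (hd : 0 < deleted.length) :
    (if added.length > deleted.length then
        (List.range (added.length - deleted.length)).foldl (fun m i =>
          dmod m "modified" (fun v => v ++ [[some (added.getD (deleted.length + i) 0), some ((deleted.getLast?).getD 0)]]))
          ((List.range deleted.length).foldl (fun m i =>
            dmod m "modified" (fun v => v ++ [[some (added.getD i 0), some (deleted.getD i 0)]])) modifieds)
      else if added.length < deleted.length then
        (List.range (deleted.length - added.length)).foldl (fun m i =>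
          dmod m "modified" (fun v => v ++ [[some ((added.getLast?).getD 0), some (deleted.getD (added.length + i) 0)]]))
          ((List.range added.length).foldl (fun m i =>
            dmod m "modified" (fun v => v ++ [[some (added.getD i 0), some (deleted.getD i 0)]])) modifieds)
      else
        (added.zip deleted).foldl (fun m p =>
          dmod m "modified" (fun v => v ++ [[some p.1, some p.2]])) modifieds)
      = dmod modifieds "modified" (fun v => v ++ clampedPairs added deleted) := by
  rcases lt_trichotomy deleted.length added.length with h | h | h
  · rw [if_pos h]
    simp only [foldl_dmod_append, dmod_dmod]
    have hL : clampedPairs added deleted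
        = (List.range deleted.length).map (fun i => [some (added.getD i 0), some (deleted.getD i 0)])
          ++ (List.range (added.length - deleted.length)).map (fun i =>
               [some (added.getD (deleted.length + i) 0), some (deleted.getLast?.getD 0)]) := by
      unfold clampedPairs
      have hmax : max added.length deleted.length = added.length := by omega
      have hrange : List.range added.length
          = List.range deleted.length ++ (List.range (added.length - deleted.length)).map (fun x => deleted.length + x) := by
        conv_lhs => rw [show added.length = deleted.length + (added.length - deleted.length) by omega]
        rw [List.range_add]
      rw [hmax, hrange, List.map_append, List.map_map]
      congr 1
      · apply List.map_congr_left; intro i hi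
        rw [List.mem_range] at hi
        have h1 : min i (added.length - 1) = i := by omega
        have h2 : min i (deleted.length - 1) = i := by omega
        rw [h1, h2]
      · apply List.map_congr_left; intro i hi
        rw [List.mem_range] at hi
        have h1 : min (deleted.length + i) (added.length - 1) = deleted.length + i := by omega
        have h2 : min (deleted.length + i) (deleted.length - 1) = deleted.length - 1 := by omega
        simp only [Function.comp_apply, h1, h2]
        congr 2
        rw [List.getLast?_eq_getElem?, List.getD_eq_getElem?_getD]
    rw [hL]
    simp [List.append_assoc]
  · rw [if_neg (by omega), if_neg (by omega)]
    simp only [foldl_dmod_append]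
    have hL : clampedPairs added deleted = (added.zip deleted).map (fun p => [some p.1, some p.2]) := by
      unfold clampedPairs
      apply List.ext_getElem
      · simp; omega
      · intro i h1 h2
        simp only [List.length_map, List.length_range] at h1
        have hia : i < added.length := by omega
        have hid : i < deleted.length := by omega
        simp only [List.getElem_map, List.getElem_zip, List.getElem_range]
        have e1 : min i (added.length - 1) = i := by omega
        have e2 : min i (deleted.length - 1) = i := by omega
        rw [e1, e2, List.getD_eq_getElem _ _ hia, List.getD_eq_getElem _ _ hid]
    rw [hL]
  · rw [if_neg (by omega), if_pos h]
    simp only [foldl_dmod_append, dmod_dmod]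
    have hL : clampedPairs added deleted
        = (List.range added.length).map (fun i => [some (added.getD i 0), some (deleted.getD i 0)])
          ++ (List.range (deleted.length - added.length)).map (fun i =>
               [some (added.getLast?.getD 0), some (deleted.getD (added.length + i) 0)]) := by
      unfold clampedPairs
      have hmax : max added.length deleted.length = deleted.length := by omega
      have hrange : List.range deleted.length
          = List.range added.length ++ (List.range (deleted.length - added.length)).map (fun x => added.length + x) := by
        conv_lhs => rw [show deleted.length = added.length + (deleted.length - added.length) by omega]
        rw [List.range_add]
      rw [hmax, hrange, List.map_append, List.map_map]
      congr 1
      · apply List.map_congr_left; intro i hi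
        rw [List.mem_range] at hi
        have h1 : min i (added.length - 1) = i := by omega
        have h2 : min i (deleted.length - 1) = i := by omega
        rw [h1, h2]
      · apply List.map_congr_left; intro i hi
        rw [List.mem_range] at hi
        have h1 : min (added.length + i) (added.length - 1) = added.length - 1 := by omega
        have h2 : min (added.length + i) (deleted.length - 1) = added.length + i := by omega
        simp only [Function.comp_apply, h1, h2]
        congr 2
        rw [List.getLast?_eq_getElem?, List.getD_eq_getElem?_getD]
    rw [hL]
    simp [List.append_assoc]

theorem update_diff_spec' (added : List Int) (deleted : List Int)
    (modifieds : List (String × List (List (Option Int)))) (based_on_ED : Bool)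
    (line_no_and_context : Option (List Int)) :
    update_diff added deleted modifieds based_on_ED line_no_and_context
      = update_diff_alt added deleted modifieds based_on_ED line_no_and_context := by
  unfold update_diff update_diff_alt
  by_cases hne : added.length > 0 ∧ deleted.length > 0
  · have hne' : added ≠ [] ∧ deleted ≠ [] := by
      constructor <;> [exact List.length_pos_iff.mp hne.1; exact List.length_pos_iff.mp hne.2]
    rw [if_pos hne, if_pos hne']
    cases based_on_ED with
    | true => simp
    | false =>
      simp only [Bool.not_false, reduceIte]
      rw [pairRec_eq_clamped added deleted hne'.1 hne'.2]
      have := A_modified_eq added deleted modifieds hne.1 hne.2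
      rcases lt_trichotomy deleted.length added.length with h | h | h
      · rw [if_pos h] at this ⊢; exact congrArg _ (congrArg _ this)
      · rw [if_neg (by omega), if_neg (by omega)] at this ⊢
        exact congrArg _ (congrArg _ this)
      · rw [if_neg (by omega), if_pos h] at this ⊢; exact congrArg _ (congrArg _ this)
  · have hne' : ¬ (added ≠ [] ∧ deleted ≠ []) := fun ⟨h1, h2⟩ =>
      hne ⟨List.length_pos_iff.mpr h1, List.length_pos_iff.mpr h2⟩
    rw [if_neg hne, if_neg hne']
    by_cases h0 : added.length = 0
    · rw [if_pos h0, if_pos (List.length_eq_zero_iff.mp h0)]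
    · rw [if_neg h0, if_neg (fun h => h0 (by simp [h]))]

-- ===== VERDICT (by name: the statement is the Claim_ definition above) =====
theorem update_diff_spec : Claim_equal_update_diff := by
  intro added deleted modifieds based_on_ED line_no_and_context _ _
  exact update_diff_spec' added deleted modifieds based_on_ED line_no_and_context
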